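-- pv_equiv track=rewrite | github.com/Amar240/Sanjaya-Ai-2.0 | backend/app/agents/planner.py | _dependency_depths
-- ===== SOURCE A (Python) =====
-- def _dependency_depths(dependencies: dict[str, set[str]]) -> dict[str, int]:
--     memo: dict[str, int] = {}
--
--     def depth(course_id: str, stack: set[str]) -> int:
--         if course_id in memo:
--             return memo[course_id]
--         if course_id in stack:
--             return 0
--         stack.add(course_id)
--         prereqs = dependencies.get(course_id, set())
--         if not prereqs:
--             out = 0
--         else:
--             out = 1 + max(depth(prereq, stack) for prereq in prereqs)
--         stack.remove(course_id)
--         memo[course_id] = out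
--         return out
--
--     for course_id in dependencies:
--         depth(course_id, set())
--     return memo
-- ===== SOURCE B (Python) =====
-- def _dependency_depths(dependencies: dict[str, set[str]]) -> dict[str, int]:
--     # Pass 1: collect finalization (post-)order with a plain traversal, no arithmetic.
--     order: list[str] = []
--     done: set[str] = set()
--
--     def visit(course_id: str, path: set[str]) -> None:
--         if course_id in done or course_id in path:
--             return
--         path.add(course_id)
--         for prereq in dependencies.get(course_id, set()):
--             visit(prereq, path)
--         path.remove(course_id)
--         done.add(course_id)
--         order.append(course_id)
--
--     for course_id in dependencies:
--         visit(course_id, set())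
--
--     # Pass 2: one linear sweep in finalization order; a prereq not finalized yet
--     # (i.e. on the call path at that point) contributes 0, matching the traversal.
--     depths: dict[str, int] = {}
--     for course_id in order:
--         prereqs = dependencies.get(course_id, set())
--         depths[course_id] = 1 + max(depths.get(p, 0) for p in prereqs) if prereqs else 0
--     return depths
-- ===== Notes on version B (the rewrite author's own statement) =====
-- stated objective: alternative
-- what changed: A computes depths with one memoized recursion that returns integers and threads a memo through nested max() calls; B decomposes the job into two simple passes: a post-order traversal that only collects the finalization order (no arithmetic), then a single linear sweep that assigns each course 0 or 1 + max of the already-assigned prereq depths.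
import Mathlib
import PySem

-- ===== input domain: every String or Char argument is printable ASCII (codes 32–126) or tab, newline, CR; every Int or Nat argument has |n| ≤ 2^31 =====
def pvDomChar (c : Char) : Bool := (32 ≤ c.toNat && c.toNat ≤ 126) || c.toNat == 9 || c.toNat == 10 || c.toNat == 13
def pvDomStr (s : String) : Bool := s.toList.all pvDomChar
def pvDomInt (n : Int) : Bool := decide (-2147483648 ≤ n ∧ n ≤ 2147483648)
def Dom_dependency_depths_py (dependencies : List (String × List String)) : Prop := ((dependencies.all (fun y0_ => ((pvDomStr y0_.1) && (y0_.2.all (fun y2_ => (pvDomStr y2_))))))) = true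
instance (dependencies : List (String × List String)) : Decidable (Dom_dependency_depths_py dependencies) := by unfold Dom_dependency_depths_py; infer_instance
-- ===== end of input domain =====

-- B replaces A's single memoized depth recursion by two simple passes — a plain
-- post-order traversal that does no arithmetic, then one linear sweep assigning
-- depths in that order — same return value (objective: alternative decomposition).

-- fuel bound shared by both ports (a totality guard only: the recursion depth is
-- bounded by the number of node occurrences in the input, so the 0-fuel branch is
-- never reached on any input)
def pvFuel (deps : List (String × List String)) : Nat :=
  deps.length + (deps.map (fun p => p.2.length)).sum + 1

-- ===== PORT A =====
-- literal transliteration of A's inner `depth` (memo and stack threaded; the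
-- `match n` fuel guard only makes the recursion structural)
def pyDepthA (deps : List (String × List String)) :
    Nat → String → PySem.Set String → PySem.Dict String Int → PySem.Dict String Int × Int
  | n, c, stack, memo =>
    match PySem.Dict.get? memo c with
    | some v => (memo, v)
    | none =>
      if PySem.Set.contains stack c then (memo, 0)
      else
        match n with
        | 0 => (memo, 0)
        | Nat.succ m =>
          let stack' := PySem.Set.add stack c
          let prereqs : List String := PySem.Dict.getD (PySem.Dict.mk deps) c []
          if prereqs.isEmpty then (PySem.Dict.insert memo c 0, (0 : Int))
          else
            -- max(depth(prereq, stack) for prereq in prereqs), memo threaded through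
            let r := prereqs.foldl
              (fun (p : PySem.Dict String Int × Option Int) q =>
                let s := pyDepthA deps m q stack' p.1
                (s.1, match p.2 with | none => some s.2 | some a => some (max a s.2)))
              (memo, none)
            let out : Int := 1 + r.2.getD 0
            (PySem.Dict.insert r.1 c out, out)

def dependency_depths_py (dependencies : List (String × List String)) : List (String × Int) :=
  (dependencies.foldl
    (fun memo kv => (pyDepthA dependencies (pvFuel dependencies) kv.1 PySem.Set.empty memo).1)
    PySem.Dict.empty).items

-- ===== PORT B =====
-- pass 1: `visit` — post-order collection (`done` is the set of elements of `order`)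
def pvVisitB (deps : List (String × List String)) :
    Nat → String → PySem.Set String → List String → List String
  | n, c, path, order =>
    if order.contains c || PySem.Set.contains path c then order
    else
      match n with
      | 0 => order
      | Nat.succ m =>
        ((PySem.Dict.getD (PySem.Dict.mk deps) c []).foldl
          (fun o q => pvVisitB deps m q (PySem.Set.add path c) o) order) ++ [c]

-- pass 2 body: depths[c] = 1 + max(depths.get(p, 0) for p in prereqs) if prereqs else 0
def pvStepB (deps : List (String × List String)) (d : PySem.Dict String Int) (c : String) :
    PySem.Dict String Int :=
  let prereqs : List String := PySem.Dict.getD (PySem.Dict.mk deps) c []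
  PySem.Dict.insert d c
    (if prereqs.isEmpty then 0 else
      1 + ((prereqs.foldl
        (fun (a : Option Int) q =>
          match a with
          | none => some (PySem.Dict.getD d q 0)
          | some x => some (max x (PySem.Dict.getD d q 0))) none).getD 0))

def pvValsB (deps : List (String × List String)) (l : List String) : PySem.Dict String Int :=
  l.foldl (pvStepB deps) PySem.Dict.empty

def dependency_depths_py_alt (dependencies : List (String × List String)) : List (String × Int) :=
  let order := dependencies.foldl
    (fun o kv => pvVisitB dependencies (pvFuel dependencies) kv.1 PySem.Set.empty o) []
  (pvValsB dependencies order).items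

-- ===== PRECONDITION & SPEC =====
def Spec_dependency_depths_py (dependencies : List (String × List String)) (out : List (String × Int)) : Prop := out = dependency_depths_py_alt dependencies
instance (dependencies : List (String × List String)) (out : List (String × Int)) : Decidable (Spec_dependency_depths_py dependencies out) := by unfold Spec_dependency_depths_py; infer_instance

-- ===== CLAIM (what is proved, stated in full; the proofs are below) =====
def Claim_equal_dependency_depths_py : Prop := ∀ (dependencies : List (String × List String)), Dom_dependency_depths_py dependencies → Spec_dependency_depths_py dependencies (dependency_depths_py dependencies)

-- ===== LEMMAS AND PROOFS =====

-- visit reductions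
lemma pvVisit_skip (deps : List (String × List String)) (n : Nat) (c : String)
    (path : PySem.Set String) (fin : List String)
    (h : c ∈ fin ∨ c ∈ path) :
    pvVisitB deps n c path fin = fin := by
  rcases h with h | h <;> cases n <;> simp [pvVisitB, h]

lemma pvVisit_go (deps : List (String × List String)) (m : Nat) (c : String)
    (path : PySem.Set String) (fin : List String)
    (h1 : c ∉ fin) (h2 : c ∉ path) :
    pvVisitB deps (m+1) c path fin =
      ((PySem.Dict.getD (PySem.Dict.mk deps) c []).foldl
        (fun o q => pvVisitB deps m q (PySem.Set.add path c) o) fin) ++ [c] := by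
  simp [pvVisitB, h1, h2]

lemma pvVisit_zero (deps : List (String × List String)) (c : String)
    (path : PySem.Set String) (fin : List String) :
    pvVisitB deps 0 c path fin = fin := by
  simp [pvVisitB]

lemma pvVisitFold_zero (deps : List (String × List String)) (path : PySem.Set String) :
    ∀ (qs : List String) (fin : List String),
      qs.foldl (fun o q => pvVisitB deps 0 q path o) fin = fin := by
  intro qs
  induction qs with
  | nil => intro fin; rfl
  | cons q qs ih => intro fin; rw [List.foldl_cons, pvVisit_zero]; exact ih fin

lemma pvVisit_ext (deps : List (String × List String)) (n : Nat) :
    ∀ (c : String) (path : PySem.Set String) (fin : List String),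
      ∃ ext, pvVisitB deps n c path fin = fin ++ ext ∧
        (∀ x ∈ ext, x ∉ fin ∧ x ∉ path) := by
  induction n with
  | zero =>
    intro c path fin
    exact ⟨[], by simp [pvVisit_zero], by simp⟩
  | succ m ih =>
    intro c path fin
    by_cases hcf : c ∈ fin
    · exact ⟨[], by simp [pvVisit_skip _ _ _ _ _ (Or.inl hcf)], by simp⟩
    by_cases hcp : c ∈ path
    · exact ⟨[], by simp [pvVisit_skip _ _ _ _ _ (Or.inr hcp)], by simp⟩
    have FOLD : ∀ (qs : List String) (fin' : List String),
        ∃ ext, qs.foldl (fun o q => pvVisitB deps m q (PySem.Set.add path c) o) fin' = fin' ++ ext ∧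
          (∀ x ∈ ext, x ∉ fin' ∧ x ∉ PySem.Set.add path c) := by
      intro qs
      induction qs with
      | nil => intro fin'; exact ⟨[], by simp, by simp⟩
      | cons q qs ihq =>
        intro fin'
        obtain ⟨e1, h1, h1p⟩ := ih q (PySem.Set.add path c) fin'
        obtain ⟨e2, h2, h2p⟩ := ihq (fin' ++ e1)
        refine ⟨e1 ++ e2, ?_, ?_⟩
        · simp [List.foldl_cons, h1, h2, List.append_assoc]
        · intro x hx
          rcases List.mem_append.mp hx with hx | hx
          · exact h1p x hx
          · exact ⟨fun hm => (h2p x hx).1 (List.mem_append.mpr (Or.inl hm)), (h2p x hx).2⟩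
    obtain ⟨e, he, hep⟩ := FOLD (PySem.Dict.getD (PySem.Dict.mk deps) c []) fin
    refine ⟨e ++ [c], ?_, ?_⟩
    · rw [pvVisit_go deps m c path fin hcf hcp, he, List.append_assoc]
    · intro x hx
      rcases List.mem_append.mp hx with hx | hx
      · exact ⟨(hep x hx).1, fun hm => (hep x hx).2 ((PySem.Set.mem_add _ _ _).mpr (Or.inl hm))⟩
      · simp at hx; subst hx; exact ⟨hcf, hcp⟩

lemma pvVisitFold_ext (deps : List (String × List String)) (m : Nat) (path : PySem.Set String) :
    ∀ (qs : List String) (fin : List String),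
      ∃ ext, qs.foldl (fun o q => pvVisitB deps m q path o) fin = fin ++ ext ∧
        (∀ x ∈ ext, x ∉ fin ∧ x ∉ path) := by
  intro qs
  induction qs with
  | nil => intro fin; exact ⟨[], by simp, by simp⟩
  | cons q qs ihq =>
    intro fin
    obtain ⟨e1, h1, h1p⟩ := pvVisit_ext deps m q path fin
    obtain ⟨e2, h2, h2p⟩ := ihq (fin ++ e1)
    refine ⟨e1 ++ e2, ?_, ?_⟩
    · simp [List.foldl_cons, h1, h2, List.append_assoc]
    · intro x hx
      rcases List.mem_append.mp hx with hx | hx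
      · exact h1p x hx
      · exact ⟨fun hm => (h2p x hx).1 (List.mem_append.mpr (Or.inl hm)), (h2p x hx).2⟩

-- dict-side basics
lemma foldl_step_get?_stable (deps : List (String × List String)) :
    ∀ (l : List String) (d : PySem.Dict String Int) (x : String), x ∉ l →
      (l.foldl (pvStepB deps) d).get? x = d.get? x := by
  intro l
  induction l with
  | nil => intro d x _; rfl
  | cons h t ih =>
    intro d x hx
    have hne : x ≠ h := fun e => hx (e ▸ List.mem_cons_self ..)
    simp only [List.foldl_cons]
    rw [ih _ x (fun m => hx (List.mem_cons_of_mem _ m))]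
    exact PySem.Dict.get?_insert_of_ne d _ hne

lemma foldl_step_get?_isSome (deps : List (String × List String)) :
    ∀ (l : List String) (d : PySem.Dict String Int) (x : String),
      ((d.get? x).isSome = true ∨ x ∈ l) →
      ((l.foldl (pvStepB deps) d).get? x).isSome = true := by
  intro l
  induction l with
  | nil =>
    intro d x h
    rcases h with h | h
    · simpa using h
    · simp at h
  | cons hd t ih =>
    intro d x h
    simp only [List.foldl_cons]
    by_cases hx : x = hd
    · subst hx
      refine ih _ x (Or.inl ?_)
      show ((PySem.Dict.insert d x _).get? x).isSome = true
      rw [PySem.Dict.get?_insert_self]; rfl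
    · refine ih _ x ?_
      rcases h with h | h
      · refine Or.inl ?_
        show ((PySem.Dict.insert d hd _).get? x).isSome = true
        rw [PySem.Dict.get?_insert_of_ne _ _ hx]; exact h
      · rcases List.mem_cons.mp h with h | h
        · exact absurd h hx
        · exact Or.inr h

lemma valsB_get?_of_not_mem (deps : List (String × List String)) (l : List String) (x : String)
    (h : x ∉ l) : (pvValsB deps l).get? x = none := by
  unfold pvValsB
  rw [foldl_step_get?_stable deps l _ x h]
  rfl

lemma valsB_getD_of_not_mem (deps : List (String × List String)) (l : List String) (x : String)
    (h : x ∉ l) : (pvValsB deps l).getD x 0 = 0 := by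
  rw [PySem.Dict.getD_eq_get?_getD, valsB_get?_of_not_mem deps l x h]; rfl

lemma valsB_get?_of_mem (deps : List (String × List String)) (l : List String) (x : String)
    (h : x ∈ l) : (pvValsB deps l).get? x = some ((pvValsB deps l).getD x 0) := by
  have hs := foldl_step_get?_isSome deps l PySem.Dict.empty x (Or.inr h)
  obtain ⟨v, hv⟩ := Option.isSome_iff_exists.mp hs
  have hv' : (pvValsB deps l).get? x = some v := hv
  rw [hv', PySem.Dict.getD_eq_get?_getD, hv']; rfl

lemma valsB_append_singleton (deps : List (String × List String)) (l : List String) (c : String) :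
    pvValsB deps (l ++ [c]) = pvStepB deps (pvValsB deps l) c := by
  unfold pvValsB
  rw [List.foldl_append]
  rfl

lemma valsB_getD_stable (deps : List (String × List String)) (fin ext : List String) (x : String)
    (hx : x ∉ ext) :
    (pvValsB deps (fin ++ ext)).getD x 0 = (pvValsB deps fin).getD x 0 := by
  rw [PySem.Dict.getD_eq_get?_getD, PySem.Dict.getD_eq_get?_getD]
  unfold pvValsB
  rw [List.foldl_append]
  rw [foldl_step_get?_stable deps ext _ x hx]

-- A-side reduction lemmas
lemma depthA_memo (deps : List (String × List String)) (n : Nat) (c : String)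
    (path : PySem.Set String) (memo : PySem.Dict String Int) (v : Int)
    (h : PySem.Dict.get? memo c = some v) :
    pyDepthA deps n c path memo = (memo, v) := by
  cases n <;> simp [pyDepthA, h]

lemma depthA_stack (deps : List (String × List String)) (n : Nat) (c : String)
    (path : PySem.Set String) (memo : PySem.Dict String Int)
    (h : PySem.Dict.get? memo c = none) (h2 : c ∈ path) :
    pyDepthA deps n c path memo = (memo, 0) := by
  cases n <;> simp [pyDepthA, h, h2]

lemma depthA_zero (deps : List (String × List String)) (c : String)
    (path : PySem.Set String) (memo : PySem.Dict String Int)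
    (h : PySem.Dict.get? memo c = none) (h2 : c ∉ path) :
    pyDepthA deps 0 c path memo = (memo, 0) := by
  simp [pyDepthA, h, h2]

lemma depthA_succ_nil (deps : List (String × List String)) (m : Nat) (c : String)
    (path : PySem.Set String) (memo : PySem.Dict String Int)
    (h : PySem.Dict.get? memo c = none) (h2 : c ∉ path)
    (hq : PySem.Dict.getD (PySem.Dict.mk deps) c [] = []) :
    pyDepthA deps (m+1) c path memo = (PySem.Dict.insert memo c 0, 0) := by
  simp [pyDepthA, h, h2, hq]

lemma depthA_succ_cons (deps : List (String × List String)) (m : Nat) (c : String)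
    (path : PySem.Set String) (memo : PySem.Dict String Int)
    (h : PySem.Dict.get? memo c = none) (h2 : c ∉ path)
    (hq : PySem.Dict.getD (PySem.Dict.mk deps) c [] ≠ []) :
    pyDepthA deps (m+1) c path memo =
      (PySem.Dict.insert
        ((PySem.Dict.getD (PySem.Dict.mk deps) c []).foldl
          (fun (p : PySem.Dict String Int × Option Int) q =>
            let s := pyDepthA deps m q (PySem.Set.add path c) p.1
            (s.1, match p.2 with | none => some s.2 | some a => some (max a s.2)))
          (memo, none)).1 c
        (1 + ((PySem.Dict.getD (PySem.Dict.mk deps) c []).foldl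
          (fun (p : PySem.Dict String Int × Option Int) q =>
            let s := pyDepthA deps m q (PySem.Set.add path c) p.1
            (s.1, match p.2 with | none => some s.2 | some a => some (max a s.2)))
          (memo, none)).2.getD 0),
       1 + ((PySem.Dict.getD (PySem.Dict.mk deps) c []).foldl
          (fun (p : PySem.Dict String Int × Option Int) q =>
            let s := pyDepthA deps m q (PySem.Set.add path c) p.1
            (s.1, match p.2 with | none => some s.2 | some a => some (max a s.2)))
          (memo, none)).2.getD 0) := by
  simp [pyDepthA, h, h2, hq]

def pvRV (deps : List (String × List String)) (n : Nat) (c : String)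
    (path : PySem.Set String) (fin : List String) : Int :=
  if c ∈ fin then (pvValsB deps fin).getD c 0
  else if c ∈ path then 0
  else (pvValsB deps (pvVisitB deps n c path fin)).getD c 0

lemma pvRV_uniform (deps : List (String × List String)) (n : Nat) (c : String)
    (path : PySem.Set String) (fin : List String) :
    pvRV deps n c path fin = (pvValsB deps (pvVisitB deps n c path fin)).getD c 0 := by
  unfold pvRV
  by_cases h1 : c ∈ fin
  · rw [pvVisit_skip _ _ _ _ _ (Or.inl h1)]; simp [h1]
  by_cases h2 : c ∈ path
  · rw [pvVisit_skip _ _ _ _ _ (Or.inr h2)]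
    simp [h1, h2, valsB_getD_of_not_mem deps fin c h1]
  · simp [h1, h2]

lemma pvMain (deps : List (String × List String)) (n : Nat) :
    ∀ (c : String) (path : PySem.Set String) (fin : List String),
      (∀ x ∈ fin, x ∉ path) →
      pyDepthA deps n c path (pvValsB deps fin) =
        (pvValsB deps (pvVisitB deps n c path fin), pvRV deps n c path fin) := by
  induction n with
  | zero =>
    intro c path fin hinv
    by_cases h1 : c ∈ fin
    · rw [depthA_memo deps 0 c path _ _ (valsB_get?_of_mem deps fin c h1),
        pvVisit_skip _ _ _ _ _ (Or.inl h1)]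
      unfold pvRV; simp [h1]
    have hn := valsB_get?_of_not_mem deps fin c h1
    rw [pvVisit_zero]
    by_cases h2 : c ∈ path
    · rw [depthA_stack deps 0 c path _ hn h2]
      unfold pvRV; simp [h1, h2]
    · rw [depthA_zero deps c path _ hn h2]
      unfold pvRV
      simp [h1, h2, pvVisit_zero, valsB_getD_of_not_mem deps fin c h1]
  | succ m ih =>
    intro c path fin hinv
    by_cases h1 : c ∈ fin
    · rw [depthA_memo deps (m+1) c path _ _ (valsB_get?_of_mem deps fin c h1),
        pvVisit_skip _ _ _ _ _ (Or.inl h1)]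
      unfold pvRV; simp [h1]
    have hn := valsB_get?_of_not_mem deps fin c h1
    by_cases h2 : c ∈ path
    · rw [depthA_stack deps (m+1) c path _ hn h2, pvVisit_skip _ _ _ _ _ (Or.inr h2)]
      unfold pvRV; simp [h1, h2]
    have hinv' : ∀ x ∈ fin, x ∉ PySem.Set.add path c := by
      intro x hx hm
      rcases (PySem.Set.mem_add _ _ _).mp hm with hm | hm
      · exact hinv x hx hm
      · exact h1 (hm ▸ hx)
    by_cases hq : PySem.Dict.getD (PySem.Dict.mk deps) c [] = []
    · have hv : pvVisitB deps (m+1) c path fin = fin ++ [c] := by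
        rw [pvVisit_go deps m c path fin h1 h2, hq]; simp
      have hd : pvValsB deps (fin ++ [c]) = PySem.Dict.insert (pvValsB deps fin) c 0 := by
        rw [valsB_append_singleton]; unfold pvStepB; simp [hq]
      rw [depthA_succ_nil deps m c path _ hn h2 hq, hv, hd]
      unfold pvRV
      simp [h1, h2, hv, hd, PySem.Dict.getD_insert_self]
    · -- main case: nonempty prereq list
      have FOLD : ∀ (ql : List String) (fin' : List String) (accO : Option Int),
          (∀ x ∈ fin', x ∉ PySem.Set.add path c) →
          ql.foldl (fun (p : PySem.Dict String Int × Option Int) q =>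
              let s := pyDepthA deps m q (PySem.Set.add path c) p.1
              (s.1, match p.2 with | none => some s.2 | some a => some (max a s.2)))
            (pvValsB deps fin', accO)
          = (pvValsB deps (ql.foldl (fun o q => pvVisitB deps m q (PySem.Set.add path c) o) fin'),
             ql.foldl (fun (a : Option Int) q =>
                match a with
                | none => some (PySem.Dict.getD (pvValsB deps (ql.foldl (fun o q => pvVisitB deps m q (PySem.Set.add path c) o) fin')) q 0)
                | some x => some (max x (PySem.Dict.getD (pvValsB deps (ql.foldl (fun o q => pvVisitB deps m q (PySem.Set.add path c) o) fin')) q 0))) accO) := by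
        intro ql
        induction ql with
        | nil => intro fin' accO _; rfl
        | cons q ql ihq =>
          intro fin' accO hinvf
          obtain ⟨e1, he1, he1p⟩ := pvVisit_ext deps m q (PySem.Set.add path c) fin'
          have hinv1 : ∀ x ∈ pvVisitB deps m q (PySem.Set.add path c) fin', x ∉ PySem.Set.add path c := by
            rw [he1]; intro x hx
            rcases List.mem_append.mp hx with hx | hx
            · exact hinvf x hx
            · exact (he1p x hx).2
          have STAB : PySem.Dict.getD (pvValsB deps (pvVisitB deps m q (PySem.Set.add path c) fin')) q 0
              = PySem.Dict.getD (pvValsB deps (ql.foldl (fun o q => pvVisitB deps m q (PySem.Set.add path c) o) (pvVisitB deps m q (PySem.Set.add path c) fin'))) q 0 := by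
            obtain ⟨e2, he2, he2p⟩ := pvVisitFold_ext deps m (PySem.Set.add path c) ql (pvVisitB deps m q (PySem.Set.add path c) fin')
            by_cases hqf : q ∈ pvVisitB deps m q (PySem.Set.add path c) fin'
            · rw [he2, valsB_getD_stable deps _ e2 q (fun hm => (he2p q hm).1 hqf)]
            · by_cases hqp : q ∈ PySem.Set.add path c
              · rw [he2, valsB_getD_of_not_mem deps _ q hqf,
                  valsB_getD_of_not_mem deps _ q ?_]
                intro hm
                rcases List.mem_append.mp hm with hm | hm
                · exact hqf hm
                · exact (he2p q hm).2 hqp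
              · cases m with
                | zero => rw [pvVisitFold_zero]
                | succ m' =>
                  exfalso
                  have hqfin' : q ∉ fin' := fun hm => hqf (by rw [he1]; exact List.mem_append.mpr (Or.inl hm))
                  rw [pvVisit_go deps m' q (PySem.Set.add path c) fin' hqfin' hqp] at hqf
                  simp at hqf
          simp only [List.foldl_cons]
          have hstep := ih q (PySem.Set.add path c) fin' hinvf
          simp only [hstep, pvRV_uniform]
          rw [ihq (pvVisitB deps m q (PySem.Set.add path c) fin') _ hinv1]
          rw [STAB]
      have hv : pvVisitB deps (m+1) c path fin =
          ((PySem.Dict.getD (PySem.Dict.mk deps) c []).foldl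
            (fun o q => pvVisitB deps m q (PySem.Set.add path c) o) fin) ++ [c] :=
        pvVisit_go deps m c path fin h1 h2
      rw [depthA_succ_cons deps m c path _ hn h2 hq, FOLD _ fin none hinv']
      unfold pvRV
      rw [if_neg h1, if_neg h2, hv, valsB_append_singleton]
      unfold pvStepB
      simp [hq, PySem.Dict.getD_insert_self]

lemma pvOuter (deps : List (String × List String)) :
    ∀ (l : List (String × List String)) (fin : List String),
      l.foldl (fun memo kv => (pyDepthA deps (pvFuel deps) kv.1 PySem.Set.empty memo).1)
        (pvValsB deps fin)
      = pvValsB deps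
          (l.foldl (fun o kv => pvVisitB deps (pvFuel deps) kv.1 PySem.Set.empty o) fin) := by
  intro l
  induction l with
  | nil => intro fin; rfl
  | cons kv l ihl =>
    intro fin
    simp only [List.foldl_cons]
    rw [pvMain deps (pvFuel deps) kv.1 PySem.Set.empty fin
      (fun x _ hx => by simp [PySem.Set.empty] at hx)]
    exact ihl (pvVisitB deps (pvFuel deps) kv.1 PySem.Set.empty fin)


-- ===== VERDICT (by name: the statement is the Claim_ definition above) =====
theorem dependency_depths_py_spec : Claim_equal_dependency_depths_py := by
  intro deps _
  unfold Spec_dependency_depths_py dependency_depths_py dependency_depths_py_alt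
  have h0 : (PySem.Dict.empty : PySem.Dict String Int) = pvValsB deps [] := rfl
  rw [h0, pvOuter deps deps []]
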